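-- pv_equiv track=rewrite | github.com/ASSERT-KTH/C4B_APR | data_directory/2785_problem_id/105031_author_id/Rejected.py | get_max_vk
-- ===== SOURCE A (Python) =====
-- def get_max_vk(input_string):
--
--
--
--     if not isinstance(input_string, str):
--
--         raise TypeError('Value should be string')
--
--
--
--     s_len = len(input_string)
--
--
--
--     if s_len < 1 or s_len > 100:
--
--         raise ValueError('String length should be between 1 and 100')
--
--
--
--     last_char = ''
--
--     total = 0
--
--     can_sub = False
--
--
--
--     for char in input_string:
--
--
--
--         if char == 'V':
--
--
--
--             if last_char == 'V':
--
--                 can_sub = True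
--
--
--
--         elif char == 'K':
--
--
--
--             if last_char == 'V':
--
--                 total += 1
--
--
--
--             elif last_char == 'K':
--
--                 can_sub = True
--
--
--
--         else:
--
--             raise ValueError('Input contains invalid character: ' + char)
--
--
--
--         last_char = char
--
--
--
--     return total + (1 if can_sub else 0)
-- ===== SOURCE B (Python) =====
-- def get_max_vk(input_string):
--     if not isinstance(input_string, str):
--         raise TypeError('Value should be string')
--     if not (1 <= len(input_string) <= 100):
--         raise ValueError('String length should be between 1 and 100')
--     for char in input_string:
--         if char not in 'VK':
--             raise ValueError('Input contains invalid character: ' + char)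
--     total = input_string.count('VK')
--     can_sub = 'VV' in input_string or 'KK' in input_string
--     return total + (1 if can_sub else 0)
-- ===== Notes on version B (the rewrite author's own statement) =====
-- stated objective: idiomatic
-- what changed: Replaces the single state-machine pass (last_char + can_sub flag) by separate library scans: str.count of the two-letter target pair for the total, and substring membership tests for a doubled letter for the swap flag, after an explicit validation loop that preserves the first-invalid-character ValueError.
import Mathlib
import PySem

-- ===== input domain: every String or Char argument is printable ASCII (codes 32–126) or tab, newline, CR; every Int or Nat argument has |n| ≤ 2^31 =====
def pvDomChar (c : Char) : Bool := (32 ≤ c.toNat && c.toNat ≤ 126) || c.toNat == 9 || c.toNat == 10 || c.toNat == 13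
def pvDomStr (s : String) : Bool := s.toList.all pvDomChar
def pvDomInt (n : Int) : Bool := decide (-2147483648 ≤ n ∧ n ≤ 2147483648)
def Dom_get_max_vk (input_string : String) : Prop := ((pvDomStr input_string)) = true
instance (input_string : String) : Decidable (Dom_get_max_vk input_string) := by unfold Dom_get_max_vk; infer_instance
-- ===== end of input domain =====

-- B replaces A's single state-machine pass by library scans (count('VK') and 'VV'/'KK' membership); idiomatic, same cost.

-- ===== PORT A =====
-- one loop step of A: state (last_char, total, can_sub); none = the ValueError branch was hit
def pvStepA (st : Option (String × Int × Bool)) (c : Char) : Option (String × Int × Bool) :=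
  match st with
  | none => none
  | some (last, total, can) =>
    if c = 'V' then
      some ("V", total, if last = "V" then true else can)
    else if c = 'K' then
      if last = "V" then some ("K", total + 1, can)
      else some ("K", total, if last = "K" then true else can)
    else none

def get_max_vk (input_string : String) : Int :=
  if PySem.Str.len input_string < 1 ∨ PySem.Str.len input_string > 100 then 0  -- ValueError; excluded by Pre_
  else
    match input_string.toList.foldl pvStepA (some ("", 0, false)) with
    | none => 0  -- ValueError (invalid character); excluded by Pre_
    | some (_, total, can) => total + (if can then 1 else 0)

-- ===== PORT B =====
def get_max_vk_alt (input_string : String) : Int :=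
  if PySem.Str.len input_string < 1 ∨ PySem.Str.len input_string > 100 then 0  -- ValueError; excluded by Pre_
  else if ¬ (input_string.toList.all fun c => c == 'V' || c == 'K') then 0  -- validation loop raises; excluded by Pre_
  else
    let total : Int := (PySem.Str.count input_string "VK" : Nat)
    let can_sub : Bool := PySem.Str.isIn "VV" input_string || PySem.Str.isIn "KK" input_string
    total + (if can_sub then 1 else 0)

-- ===== PRECONDITION & SPEC =====
-- Pre_ excludes exactly the inputs where A raises ValueError: empty/overlong strings and strings containing an invalid character.
def Pre_get_max_vk (input_string : String) : Prop :=
  1 ≤ input_string.length ∧ input_string.length ≤ 100 ∧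
    (input_string.toList.all fun c => c = 'V' ∨ c = 'K') = true
instance (input_string : String) : Decidable (Pre_get_max_vk input_string) := by
  unfold Pre_get_max_vk; infer_instance

def pvWitness_get_max_vk : String := "VKKV"

def Spec_get_max_vk (input_string : String) (out : Int) : Prop := out = get_max_vk_alt input_string
instance (input_string : String) (out : Int) : Decidable (Spec_get_max_vk input_string out) := by unfold Spec_get_max_vk; infer_instance

-- ===== CLAIM (what is proved, stated in full; the proofs are below) =====
def Claim_equal_get_max_vk : Prop := ∀ (input_string : String), Dom_get_max_vk input_string → Pre_get_max_vk input_string → Spec_get_max_vk input_string (get_max_vk input_string)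

-- ===== LEMMAS AND PROOFS =====

-- number of 'V''K' adjacent pairs in (p :: l) that start at or after p
def pvPC : Option Char → List Char → Nat
  | _, [] => 0
  | p, c :: t => (if p = some 'V' ∧ c = 'K' then 1 else 0) + pvPC (some c) t

-- number of 'V''K' adjacent pairs inside l
def pvPCN : List Char → Nat
  | [] => 0
  | c :: t => pvPC (some c) t

-- some adjacent pair of (p :: l) is equal
def pvDF : Option Char → List Char → Bool
  | _, [] => false
  | p, c :: t => (p == some c) || pvDF (some c) t

theorem pvPC_K (t : List Char) : pvPC (some 'K') t = pvPCN t := by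
  cases t <;> simp [pvPC, pvPCN]

-- A's fold computes pvPC / pvDF
theorem pvFoldA (l : List Char) : ∀ (ls : String) (p : Option Char) (t0 : Int) (c0 : Bool),
    (∀ c ∈ l, c = 'V' ∨ c = 'K') →
    ((ls = "" ∧ p = none) ∨ (ls = "V" ∧ p = some 'V') ∨ (ls = "K" ∧ p = some 'K')) →
    ∃ ls', l.foldl pvStepA (some (ls, t0, c0)) =
      some (ls', t0 + (pvPC p l : Int), c0 || pvDF p l) := by
  induction l with
  | nil => intro ls p t0 c0 _ _; exact ⟨ls, by simp [pvPC, pvDF]⟩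
  | cons c t ih =>
    intro ls p t0 c0 hv hrel
    have hc : c = 'V' ∨ c = 'K' := hv c (by simp)
    have hvt : ∀ x ∈ t, x = 'V' ∨ x = 'K' := fun x hx => hv x (by simp [hx])
    rcases hc with hc | hc <;> subst hc <;>
      rcases hrel with ⟨h1, h2⟩ | ⟨h1, h2⟩ | ⟨h1, h2⟩ <;> subst h1 <;> subst h2
    · obtain ⟨ls', h⟩ := ih "V" (some 'V') t0 c0 hvt (by simp)
      exact ⟨ls', by simp [List.foldl_cons, pvStepA, pvPC, pvDF, h]⟩
    · obtain ⟨ls', h⟩ := ih "V" (some 'V') t0 (c0 || true) hvt (by simp)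
      exact ⟨ls', by simpa [List.foldl_cons, pvStepA, pvPC, pvDF, Bool.or_assoc] using h⟩
    · obtain ⟨ls', h⟩ := ih "V" (some 'V') t0 c0 hvt (by simp)
      exact ⟨ls', by simp [List.foldl_cons, pvStepA, pvPC, pvDF, h]⟩
    · obtain ⟨ls', h⟩ := ih "K" (some 'K') t0 c0 hvt (by simp)
      exact ⟨ls', by simp [List.foldl_cons, pvStepA, pvPC, pvDF, h]⟩
    · obtain ⟨ls', h⟩ := ih "K" (some 'K') (t0 + 1) c0 hvt (by simp)
      refine ⟨ls', by simp [List.foldl_cons, pvStepA, pvPC, pvDF, h]; ring⟩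
    · obtain ⟨ls', h⟩ := ih "K" (some 'K') t0 (c0 || true) hvt (by simp)
      exact ⟨ls', by simpa [List.foldl_cons, pvStepA, pvPC, pvDF, Bool.or_assoc] using h⟩

-- non-overlapping count of "VK" = number of adjacent V,K pairs
theorem pvCountGo (fuel : Nat) : ∀ (l : List Char) (acc : Nat), l.length ≤ fuel →
    PySem.Chars.count.go ['V', 'K'] fuel l acc = acc + pvPCN l := by
  induction fuel with
  | zero =>
    intro l acc h
    have : l = [] := List.eq_nil_of_length_eq_zero (Nat.le_zero.mp h)
    subst this; simp [PySem.Chars.count.go, pvPCN]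
  | succ n ih =>
    intro l acc h
    match l with
    | [] => simp [PySem.Chars.count.go, pvPCN]
    | [c] =>
      have hp : ¬ (['V', 'K'].isPrefixOf [c] = true) := by
        simp [List.isPrefixOf]
      simp only [PySem.Chars.count.go, hp, if_neg]
      rw [ih [] acc (by simp)]
      cases c <;> simp [pvPCN, pvPC, List.isPrefixOf]
    | a :: b :: t =>
      by_cases hp : a = 'V' ∧ b = 'K'
      · obtain ⟨ha, hb⟩ := hp; subst ha; subst hb
        have hpre : List.isPrefixOf ['V', 'K'] ('V' :: 'K' :: t) = true := by
          simp [List.isPrefixOf]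
        simp only [PySem.Chars.count.go, hpre, if_pos]
        have ht : t.length ≤ n := by simp at h; omega
        rw [show List.drop (['V','K'] : List Char).length ('V'::'K'::t) = t from rfl,
          ih t (acc + 1) ht]
        simp [pvPCN, pvPC, pvPC_K]; omega
      · have hpre : ¬ (List.isPrefixOf ['V', 'K'] (a :: b :: t) = true) := by
          simp [List.isPrefixOf]; intro ha hb; exact hp ⟨ha.symm, hb.symm⟩
        simp only [PySem.Chars.count.go, hpre, if_neg]
        have ht : (b :: t).length ≤ n := by simp at h; simp; omega
        rw [ih (b :: t) acc ht]
        simp [pvPCN, pvPC]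
        intro ha hb; exact absurd ⟨ha, hb⟩ hp
theorem pvCount (l : List Char) : PySem.Chars.count l ['V', 'K'] = pvPCN l := by
  rw [show PySem.Chars.count l ['V','K'] = PySem.Chars.count.go ['V','K'] l.length l 0 from rfl]
  rw [pvCountGo l.length l 0 le_rfl]; omega

-- the duplicate flag = a VV or KK infix
theorem pvDF_iff (l : List Char) : ∀ a : Char,
    (∀ c ∈ l, c = 'V' ∨ c = 'K') → (a = 'V' ∨ a = 'K') →
    (pvDF (some a) l = true ↔ ∃ c, (c = 'V' ∨ c = 'K') ∧ [c, c] <:+: (a :: l)) := by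
  induction l with
  | nil =>
    intro a _ _
    simp only [pvDF]
    constructor
    · intro h; exact absurd h (by simp)
    · rintro ⟨c, _, h⟩
      have := h.length_le
      simp at this
  | cons b t ih =>
    intro a hv ha
    have hb : b = 'V' ∨ b = 'K' := hv b (by simp)
    have hvt : ∀ x ∈ t, x = 'V' ∨ x = 'K' := fun x hx => hv x (by simp [hx])
    simp only [pvDF, Bool.or_eq_true, beq_iff_eq, Option.some.injEq]
    rw [ih b hvt hb]
    constructor
    · rintro (h | ⟨c, hc, hinf⟩)
      · exact ⟨a, ha, by rw [← h]; exact List.infix_cons_iff.mpr (Or.inl (by simp))⟩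
      · exact ⟨c, hc, List.infix_cons_iff.mpr (Or.inr hinf)⟩
    · rintro ⟨c, hc, hinf⟩
      rcases List.infix_cons_iff.mp hinf with hpre | hinf'
      · left
        simp only [List.cons_prefix_cons] at hpre
        exact hpre.1.symm.trans hpre.2.1
      · exact Or.inr ⟨c, hc, hinf'⟩

theorem pvPC_none (l : List Char) : pvPC none l = pvPCN l := by
  cases l <;> simp [pvPC, pvPCN]

-- ===== VERDICT (by name: the statement is the Claim_ definition above) =====
theorem get_max_vk_spec : Claim_equal_get_max_vk := by
  intro s _ hpre
  obtain ⟨h1, h2, hv0⟩ := hpre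
  have hv : ∀ c ∈ s.toList, c = 'V' ∨ c = 'K' := by
    intro x hx
    have := List.all_eq_true.mp hv0 x hx
    simpa using this
  have hVV : ("VV" : String).toList = ['V', 'V'] := rfl
  have hKK : ("KK" : String).toList = ['K', 'K'] := rfl
  have hVK : ("VK" : String).toList = ['V', 'K'] := rfl
  obtain ⟨c, t, hl⟩ : ∃ c t, s.toList = c :: t := by
    cases hs : s.toList with
    | nil =>
      exfalso
      have h0 : s.toList.length = 0 := by rw [hs]; rfl
      rw [String.length_toList] at h0
      omega
    | cons c t => exact ⟨c, t, rfl⟩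
  have hc : c = 'V' ∨ c = 'K' := hv c (by simp [hl])
  have hvt : ∀ x ∈ t, x = 'V' ∨ x = 'K' := fun x hx => hv x (by simp [hl, hx])
  have hlen : ¬ (PySem.Str.len s < 1 ∨ PySem.Str.len s > 100) := by
    simp only [PySem.Str.len, String.length_toList]; omega
  have hall : (s.toList.all fun x => x == 'V' || x == 'K') = true := by
    simp only [List.all_eq_true]
    intro x hx; rcases hv x hx with h | h <;> simp [h]
  obtain ⟨ls', hfold⟩ := pvFoldA s.toList "" none 0 false hv (by simp)
  have hcnt : (PySem.Str.count s "VK" : Int) = (pvPCN s.toList : Int) := by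
    have : PySem.Str.count s "VK" = pvPCN s.toList := by
      rw [PySem.Str.count_eq, hVK]
      exact pvCount s.toList
    rw [this]
  have hflag : (PySem.Str.isIn "VV" s || PySem.Str.isIn "KK" s) = pvDF (some c) t := by
    rw [Bool.eq_iff_iff]
    have hiff := pvDF_iff t c hvt hc
    rw [hiff]
    simp only [Bool.or_eq_true, PySem.Str.isIn_eq, PySem.Chars.isIn_iff_infix]
    constructor
    · rintro (h | h)
      · exact ⟨'V', Or.inl rfl, by rw [hVV, hl] at h; exact h⟩
      · exact ⟨'K', Or.inr rfl, by rw [hKK, hl] at h; exact h⟩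
    · rintro ⟨x, hx, hinf⟩
      rcases hx with h | h <;> subst h
      · exact Or.inl (by rw [hVV, hl]; exact hinf)
      · exact Or.inr (by rw [hKK, hl]; exact hinf)
  unfold Spec_get_max_vk get_max_vk get_max_vk_alt
  rw [if_neg hlen, if_neg hlen, hfold, if_neg (by simp [hall])]
  simp only [hcnt, hflag, Bool.false_or]
  have hdf : pvDF none s.toList = pvDF (some c) t := by
    simp [hl, pvDF]
  have hpc : pvPC none s.toList = pvPCN s.toList := pvPC_none s.toList
  rw [hdf, hpc]
  omega
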